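-- pv_equiv track=rewrite | github.com/zosia-r/scripting-languages | list6/SeriesValidator.py | _get_common_messages
-- ===== SOURCE A (Python) =====
-- from typing import List
--
-- def _get_common_messages(all_messages: List[List[str]]) -> List[str]:
--     if not all_messages:
--         return []
--
--     common = set()
--
--     sublist1 = all_messages[0]
--     if not sublist1:
--         return []
--
--     for item in sublist1:
--         present = True
--         for sublist in all_messages[1:]:
--             if item not in sublist:
--                 present = False
--                 break
--         if present:
--             common.add(item)
--
--     return list(common)
-- ===== SOURCE B (Python) =====
-- from typing import List
--
-- def _get_common_messages(all_messages: List[List[str]]) -> List[str]: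
--     if not all_messages:
--         return []
--
--     counts = {}
--     for sublist in all_messages:
--         for item in set(sublist):
--             counts[item] = counts.get(item, 0) + 1
--
--     n = len(all_messages)
--     common = set()
--     for item in all_messages[0]:
--         if counts.get(item, 0) == n:
--             common.add(item)
--     return list(common)
-- ===== Notes on version B (the rewrite author's own statement) =====
-- stated objective: alternative
-- what changed: Replaces the nested membership scan (each item of sublist1 searched linearly in every other sublist) with a one-pass frequency table counting each sublist's distinct items once, then a single pass over sublist1 keeping items whose count equals the number of sublists; it trades the inner scans for hash-table counting.
import Mathlib
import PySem

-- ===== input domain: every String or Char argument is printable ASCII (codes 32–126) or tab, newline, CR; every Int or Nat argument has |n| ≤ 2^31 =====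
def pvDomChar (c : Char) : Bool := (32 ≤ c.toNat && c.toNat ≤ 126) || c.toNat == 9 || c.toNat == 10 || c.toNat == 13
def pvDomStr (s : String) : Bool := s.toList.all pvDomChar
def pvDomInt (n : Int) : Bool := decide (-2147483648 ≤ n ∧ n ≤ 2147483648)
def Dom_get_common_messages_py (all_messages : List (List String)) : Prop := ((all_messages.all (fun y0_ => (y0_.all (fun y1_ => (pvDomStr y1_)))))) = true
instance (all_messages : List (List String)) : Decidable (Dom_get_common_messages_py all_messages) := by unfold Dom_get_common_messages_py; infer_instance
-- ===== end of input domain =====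

-- B replaces A's nested membership scans with a one-pass frequency table over distinct items per sublist;
-- both build the result set in sublist1 order, so the returned lists coincide.

-- ===== PORT A =====
def get_common_messages_py (all_messages : List (List String)) : List String :=
  match all_messages with
  | [] => []                                   -- if not all_messages: return []
  | sublist1 :: rest =>
    if sublist1 = [] then []                   -- if not sublist1: return []
    else
      -- for item in sublist1: present = all sublists of all_messages[1:] contain item
      -- (the inner for/break loop computes exactly this conjunction); if present: common.add(item)
      sublist1.foldl (fun common item =>
        if rest.all (fun sublist => sublist.contains item) then
          PySem.Set.add common item
        else common) PySem.Set.empty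

-- ===== PORT B =====
def get_common_messages_py_alt (all_messages : List (List String)) : List String :=
  match all_messages with
  | [] => []                                   -- if not all_messages: return []
  | sublist1 :: _ =>
    -- counts[item] = counts.get(item, 0) + 1 over the distinct items of every sublist
    let counts : PySem.Dict String Int :=
      all_messages.foldl (fun d sublist =>
        (PySem.Set.ofList sublist).foldl (fun d item => d.insert item (d.getD item 0 + 1)) d)
        PySem.Dict.empty
    let n : Int := all_messages.length
    -- for item in all_messages[0]: if counts.get(item, 0) == n: common.add(item)
    sublist1.foldl (fun common item =>
      if counts.getD item 0 = n then PySem.Set.add common item else common)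
      PySem.Set.empty

-- ===== PRECONDITION & SPEC =====
def Spec_get_common_messages_py (all_messages : List (List String)) (out : List String) : Prop := out = get_common_messages_py_alt all_messages
instance (all_messages : List (List String)) (out : List String) : Decidable (Spec_get_common_messages_py all_messages out) := by unfold Spec_get_common_messages_py; infer_instance

-- ===== CLAIM (what is proved, stated in full; the proofs are below) =====
def Claim_equal_get_common_messages_py : Prop := ∀ (all_messages : List (List String)), Dom_get_common_messages_py all_messages → Spec_get_common_messages_py all_messages (get_common_messages_py all_messages)

-- ===== LEMMAS AND PROOFS =====

-- ===== VERDICT (by name: the statement is the Claim_ definition above) =====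
-- getD after B's counting fold = initial value + number of sublists containing x
theorem pv_getD_count_fold (subs : List (List String)) (d : PySem.Dict String Int) (x : String) :
    (subs.foldl (fun d sublist =>
        (PySem.Set.ofList sublist).foldl (fun d item => d.insert item (d.getD item 0 + 1)) d) d).getD x 0
      = d.getD x 0 + (subs.countP (fun sublist => sublist.contains x) : Int) := by
  induction subs generalizing d with
  | nil => simp
  | cons s t ih =>
    rw [List.foldl_cons, ih, PySem.Dict.getD_foldl_insert_add_one]
    have hm : x ∈ PySem.Set.ofList s ↔ x ∈ s := PySem.Set.mem_ofList s x
    have hc : (PySem.Set.ofList s).count x = (if s.contains x then 1 else 0) := by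
      by_cases h : x ∈ s
      · rw [List.count_eq_one_of_mem (PySem.Set.nodup_ofList s) (hm.mpr h)]
        simp [h]
      · rw [List.count_eq_zero_of_not_mem (fun hx => h (hm.mp hx))]
        simp [h]
    rw [List.countP_cons, hc]
    split_ifs <;> push_cast <;> ring

theorem get_common_messages_py_spec : Claim_equal_get_common_messages_py := by
  intro all_messages _
  unfold Spec_get_common_messages_py get_common_messages_py get_common_messages_py_alt
  match all_messages with
  | [] => rfl
  | sublist1 :: rest =>
    simp only []
    by_cases h1 : sublist1 = []
    · simp [h1, PySem.Set.empty]
    · rw [if_neg h1]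
      apply PySem.List.foldl_congr_mem
      intro acc item hmem
      have hkey : ((sublist1 :: rest).foldl (fun d sublist =>
          (PySem.Set.ofList sublist).foldl (fun d item => d.insert item (d.getD item 0 + 1)) d)
          PySem.Dict.empty).getD item 0 = ((sublist1 :: rest).length : Int) ↔
          rest.all (fun sublist => sublist.contains item) = true := by
        have hself : sublist1.contains item = true := by
          simpa using hmem
        rw [pv_getD_count_fold]
        simp only [PySem.Dict.getD_empty, List.countP_cons, hself, if_true,
          List.length_cons]
        have hle : rest.countP (fun sublist => sublist.contains item) ≤ rest.length :=
          List.countP_le_length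
        constructor
        · intro hEq
          rw [List.all_eq_true]
          intro s hs
          have : rest.countP (fun sublist => sublist.contains item) = rest.length := by omega
          have := (List.countP_eq_length).1 this
          exact this s hs
        · intro hAll
          have : rest.countP (fun sublist => sublist.contains item) = rest.length :=
            List.countP_eq_length.2 (List.all_eq_true.1 hAll)
          omega
      by_cases hcond : rest.all (fun sublist => sublist.contains item) = true
      · rw [if_pos hcond, if_pos (hkey.2 hcond)]
      · rw [if_neg hcond, if_neg (fun h => hcond (hkey.1 h))]
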